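-- pv_equiv track=rewrite | github.com/lhcaps/parkly | scripts/i18n-safe-edit.py | _build_position_to_line_col
-- ===== SOURCE A (Python) =====
-- def _build_position_to_line_col(text: str):
--     """Return a list where index i = byte offset, value = (line, col) 1-indexed."""
--     line_offsets = [0]  # byte offset where each line starts
--     for i, ch in enumerate(text):
--         if ch == '\n':
--             line_offsets.append(i + 1)
--     line_col = []
--     cur_line = 1
--     cur_col = 1
--     for i in range(len(text) + 1):
--         line_col.append((cur_line, cur_col))
--         if i < len(text):
--             if text[i] == '\n':
--                 cur_line += 1
--                 cur_col = 1
--             else: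
--                 cur_col += 1
--     return line_col
-- ===== SOURCE B (Python) =====
-- def _build_position_to_line_col(text: str):
--     """Return a list where index i = byte offset, value = (line, col) 1-indexed."""
--     return [(ln, col)
--             for ln, line in enumerate(text.split('\n'), start=1)
--             for col in range(1, len(line) + 2)]
-- ===== Notes on version B (the rewrite author's own statement) =====
-- stated objective: simpler
-- what changed: Replaces the char-by-char (line, col) state machine (and its dead line_offsets pass) with a split on newline whose segments directly yield the positions: line i of length L contributes columns 1..L+1.
import Mathlib
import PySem

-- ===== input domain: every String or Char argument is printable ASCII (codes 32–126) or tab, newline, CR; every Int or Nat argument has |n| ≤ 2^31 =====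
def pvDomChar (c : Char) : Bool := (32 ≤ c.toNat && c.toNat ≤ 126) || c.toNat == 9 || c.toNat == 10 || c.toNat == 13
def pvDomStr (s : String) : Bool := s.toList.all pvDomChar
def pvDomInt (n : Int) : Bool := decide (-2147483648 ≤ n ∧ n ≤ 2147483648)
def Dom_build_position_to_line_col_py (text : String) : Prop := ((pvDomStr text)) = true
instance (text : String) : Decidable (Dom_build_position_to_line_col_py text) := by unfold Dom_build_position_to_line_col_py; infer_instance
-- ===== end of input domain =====

-- B replaces A's char-by-char (line, col) state machine by splitting on '\n'; objective: simpler. Return value only; no mutation.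
-- ===== PORT A =====
-- loop body of A's second for-loop: append the current position, then advance past text[i] (if any)
def aStep (cs : List Char) (st : (Int × Int) × List (Int × Int)) (i : Int) : (Int × Int) × List (Int × Int) :=
  let line_col := st.2 ++ [(st.1.1, st.1.2)]
  if i < (cs.length : Int) then
    match PySem.Chars.pyGet? cs i with
    | some c => if c = '\n' then ((st.1.1 + 1, 1), line_col) else ((st.1.1, st.1.2 + 1), line_col)
    | none => (st.1, line_col)  -- unreachable: 0 ≤ i < len cs
  else (st.1, line_col)

def build_position_to_line_col_py (text : String) : List (Int × Int) :=
  let cs := text.toList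
  -- first loop of A: line_offsets is built but never used afterwards (dead code, kept faithfully)
  let _line_offsets : List Int :=
    (PySem.List.enumerate cs 0).foldl
      (fun acc p => if p.2 = '\n' then acc ++ [p.1 + 1] else acc) [0]
  ((PySem.List.pyRange 0 ((cs.length : Int) + 1) 1).foldl (aStep cs) ((1, 1), [])).2

-- ===== PORT B =====
-- one line of the comprehension: line number p.1, columns 1 .. len(line)+1
def bLine (p : Int × List Char) : List (Int × Int) :=
  (PySem.List.pyRange 1 ((p.2.length : Int) + 2) 1).map (fun col => (p.1, col))

-- text.split('\n') with a nonempty literal separator is exactly Chars.splitOn on the char list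
def build_position_to_line_col_py_alt (text : String) : List (Int × Int) :=
  (PySem.List.enumerate (PySem.Chars.splitOn text.toList ['\n']) 1).flatMap bLine

-- ===== PRECONDITION & SPEC =====
def Spec_build_position_to_line_col_py (text : String) (out : List (Int × Int)) : Prop := out = build_position_to_line_col_py_alt text
instance (text : String) (out : List (Int × Int)) : Decidable (Spec_build_position_to_line_col_py text out) := by unfold Spec_build_position_to_line_col_py; infer_instance

-- ===== CLAIM (what is proved, stated in full; the proofs are below) =====
def Claim_equal_build_position_to_line_col_py : Prop := ∀ (text : String), Dom_build_position_to_line_col_py text → Spec_build_position_to_line_col_py text (build_position_to_line_col_py text)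

-- ===== LEMMAS AND PROOFS =====
-- ===== VERDICT (by name: the statement is the Claim_ definition above) =====
-- canonical recursion both ports are reduced to
def posAux : List Char → Int → Int → List (Int × Int)
  | [], ln, col => [(ln, col)]
  | c :: rest, ln, col =>
      (ln, col) :: (if c = '\n' then posAux rest (ln + 1) 1 else posAux rest ln (col + 1))

-- structural view of Chars.splitOn on separator ['\n']
def segsAux (pre : List Char) : List Char → List (List Char)
  | [] => [pre]
  | c :: rest => if c = '\n' then pre :: segsAux [] rest else segsAux (pre ++ [c]) rest

theorem segsAux_go (fuel : Nat) : ∀ (l cur : List Char) (acc : List (List Char)),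
    l.length ≤ fuel →
    PySem.Chars.splitOn.go ['\n'] fuel l cur acc = acc.reverse ++ segsAux cur.reverse l := by
  induction fuel with
  | zero =>
      intro l cur acc h
      have : l = [] := List.eq_nil_of_length_eq_zero (Nat.le_zero.mp h)
      subst this
      simp [PySem.Chars.splitOn.go, segsAux]
  | succ n ih =>
      intro l cur acc h
      cases l with
      | nil => simp [PySem.Chars.splitOn.go, segsAux]
      | cons c rest =>
        simp only [PySem.Chars.splitOn.go]
        by_cases hc : c = '\n'
        · subst hc
          have hp : List.isPrefixOf ['\n'] ('\n' :: rest) = true := by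
            simp [List.isPrefixOf]
          rw [if_pos hp]
          have := ih rest [] (cur.reverse :: acc) (by simpa using Nat.le_of_succ_le_succ h)
          simp only [List.length_cons, List.drop_succ_cons, List.length_nil, List.drop_zero]
          rw [this]
          simp [segsAux]
        · have hp : List.isPrefixOf ['\n'] (c :: rest) = false := by
            simp [List.isPrefixOf]
            intro h'; exact absurd h'.symm hc
          rw [if_neg (by simp [hp])]
          have := ih rest (c :: cur) acc (by simpa using Nat.le_of_succ_le_succ h)
          rw [this]
          simp [segsAux, hc]

theorem splitOn_eq_segsAux (cs : List Char) :
    PySem.Chars.splitOn cs ['\n'] = segsAux [] cs := by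
  unfold PySem.Chars.splitOn
  rw [segsAux_go (cs.length + 1) cs [] [] (Nat.le_succ _)]
  simp

-- A's fold over range(len+1), generalized over an already-consumed prefix
theorem aFold (cs : List Char) : ∀ (pre : List Char) (ln col : Int) (acc : List (Int × Int)),
    ((PySem.List.pyRange (pre.length : Int) (((pre ++ cs).length : Int) + 1) 1).foldl
        (aStep (pre ++ cs)) ((ln, col), acc)).2 = acc ++ posAux cs ln col := by
  induction cs with
  | nil =>
      intro pre ln col acc
      rw [List.append_nil, PySem.List.pyRange_one_singleton]
      simp [aStep, posAux]
  | cons c rest ih =>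
      intro pre ln col acc
      have hlt : (pre.length : Int) < ((pre ++ c :: rest).length : Int) + 1 := by
        simp; omega
      rw [PySem.List.pyRange_one_cons hlt]
      simp only [List.foldl_cons]
      have hget : PySem.Chars.pyGet? (pre ++ c :: rest) (pre.length : Int) = some c := by
        show PySem.List.pyGet? _ _ = _
        rw [PySem.List.pyGet?_natCast]
        simp
      have hstep : aStep (pre ++ c :: rest) ((ln, col), acc) (pre.length : Int) =
          ((if c = '\n' then (ln + 1, 1) else (ln, col + 1)), acc ++ [(ln, col)]) := by
        unfold aStep
        have hi : (pre.length : Int) < ((pre ++ c :: rest).length : Int) := by simp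
        rw [if_pos hi, hget]
        by_cases hc : c = '\n' <;> simp [hc]
      rw [hstep]
      have harr : pre ++ c :: rest = (pre ++ [c]) ++ rest := by simp
      have hlen : (pre.length : Int) + 1 = ((pre ++ [c]).length : Int) := by simp
      by_cases hc : c = '\n'
      · subst hc
        rw [if_pos rfl, hlen, harr, ih (pre ++ ['\n']) (ln + 1) 1 (acc ++ [(ln, col)])]
        simp [posAux]
      · rw [if_neg hc, hlen, harr, ih (pre ++ [c]) ln (col + 1) (acc ++ [(ln, col)])]
        simp [posAux, hc]

-- columns 1 .. L of line ln
def lineCols (ln : Int) (L : Nat) : List (Int × Int) :=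
  (List.range L).map (fun (k : Nat) => (ln, (k : Int) + 1))

theorem lineCols_zero (ln : Int) : lineCols ln 0 = [] := rfl

theorem lineCols_succ (ln : Int) (L : Nat) :
    lineCols ln (L + 1) = lineCols ln L ++ [(ln, (L : Int) + 1)] := by
  simp [lineCols, List.range_succ]

-- one line's entries: columns 1 .. L+1
theorem bLine_eq (ln : Int) (l : List Char) :
    bLine (ln, l) = lineCols ln l.length ++ [(ln, (l.length : Int) + 1)] := by
  unfold bLine lineCols
  rw [PySem.List.pyRange_one]
  have h1 : ((l.length : Int) + 2 - 1).toNat = l.length + 1 := by omega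
  rw [h1, List.range_succ]
  simp only [List.map_append, List.map_map, List.map_cons, List.map_nil, Function.comp_def]
  congr 1
  · apply List.map_congr_left
    intro k _
    exact congrArg (Prod.mk ln) (Int.add_comm 1 (k : Int))
  · rw [Int.add_comm 1 (l.length : Int)]

-- B's flatMap over the segments, generalized over a partial current line
theorem bFold (cs : List Char) : ∀ (pre : List Char) (ln : Int),
    (PySem.List.enumerate (segsAux pre cs) ln).flatMap bLine =
      lineCols ln pre.length ++ posAux cs ln ((pre.length : Int) + 1) := by
  induction cs with
  | nil =>
      intro pre ln
      simp only [segsAux, PySem.List.enumerate_cons, PySem.List.enumerate_nil]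
      simp [bLine_eq, posAux]
  | cons c rest ih =>
      intro pre ln
      by_cases hc : c = '\n'
      · subst hc
        rw [show segsAux pre ('\n' :: rest) = pre :: segsAux [] rest from by simp [segsAux]]
        rw [PySem.List.enumerate_cons, List.flatMap_cons]
        rw [ih [] (ln + 1)]
        simp [bLine_eq, posAux, lineCols_zero]
      · rw [show segsAux pre (c :: rest) = segsAux (pre ++ [c]) rest from by simp [segsAux, hc]]
        rw [ih (pre ++ [c]) ln]
        have hL : (pre ++ [c]).length = pre.length + 1 := by simp
        rw [hL, lineCols_succ]
        simp [posAux, hc]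

-- ===== VERDICT (by name: the statement is the Claim_ definition above) =====
theorem build_position_to_line_col_py_spec : Claim_equal_build_position_to_line_col_py := by
  intro text _
  unfold Spec_build_position_to_line_col_py build_position_to_line_col_py build_position_to_line_col_py_alt
  rw [splitOn_eq_segsAux, bFold]
  have := aFold text.toList [] 1 1 []
  simpa using this
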